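-- pv_equiv track=rewrite | github.com/lamps-lab/knowledge-gain | data/newdata/build-kg-dataset.py | group_into_question_sets
-- ===== SOURCE A (Python) =====
-- from typing import List, Tuple, Optional
--
-- QS_SIZE = 6
--
-- def group_into_question_sets(qcols: List[Tuple[str, str, str]]) -> List[Tuple[List, List]]:
--     """
--     Given ordered Q columns, pair them by set:
--       [6 pre], [6 post].
--     (Timing columns aren't in qcols because we only captured Q* columns.)
--     """
--     sets = []
--     i = 0
--     while i < len(qcols):
--         pre = qcols[i:i+QS_SIZE]
--         i += QS_SIZE
--         post = qcols[i:i+QS_SIZE]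
--         i += QS_SIZE
--         if len(pre) != QS_SIZE or len(post) != QS_SIZE:
--             break
--         sets.append((pre, post))
--     return sets
-- ===== SOURCE B (Python) =====
-- QS_SIZE = 6
--
-- def group_into_question_sets(qcols):
--     # Streaming pass: collect elements one at a time into a buffer; each time the
--     # buffer reaches a full dozen, emit it as a (pre, post) pair and start afresh.
--     # A trailing partial buffer is simply never emitted.
--     sets = []
--     buf = []
--     for q in qcols:
--         buf.append(q)
--         if len(buf) == 2 * QS_SIZE:
--             sets.append((buf[:QS_SIZE], buf[QS_SIZE:]))
--             buf = []
--     return sets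
-- ===== Notes on version B (the rewrite author's own statement) =====
-- stated objective: alternative
-- what changed: B is a single streaming pass that accumulates elements one at a time into a buffer and flushes a (pre, post) pair each time the buffer reaches twelve, instead of A's index-driven while loop that slices the input and breaks on an incomplete slice.
import Mathlib
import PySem

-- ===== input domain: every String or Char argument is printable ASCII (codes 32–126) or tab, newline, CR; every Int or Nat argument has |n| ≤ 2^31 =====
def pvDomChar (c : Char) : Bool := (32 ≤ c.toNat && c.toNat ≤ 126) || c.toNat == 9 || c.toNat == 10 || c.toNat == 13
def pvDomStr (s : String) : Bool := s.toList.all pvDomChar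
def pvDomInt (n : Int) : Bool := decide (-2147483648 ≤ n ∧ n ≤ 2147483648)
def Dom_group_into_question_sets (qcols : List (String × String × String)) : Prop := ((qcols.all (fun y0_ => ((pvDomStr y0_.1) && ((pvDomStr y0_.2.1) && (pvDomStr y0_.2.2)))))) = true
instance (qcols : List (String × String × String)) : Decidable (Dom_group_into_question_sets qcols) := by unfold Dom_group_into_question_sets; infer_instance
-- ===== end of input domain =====

-- B replaces A's index-driven slicing while-loop (with its mid-loop break) by a single
-- streaming pass that buffers elements one at a time and flushes a (pre, post) pair
-- whenever the buffer reaches twelve (objective: alternative decomposition, same cost).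

-- ===== PORT A =====
-- the while-loop of A; `sets` is the accumulator, `i` the running index (always ≥ 0 in Python)
def groupLoopA (qcols : List (String × String × String))
    (sets : List ((List (String × String × String)) × (List (String × String × String))))
    (i : Nat) : List ((List (String × String × String)) × (List (String × String × String))) :=
  if _h : i < qcols.length then
    let pre := PySem.List.slice qcols (some (i : Int)) (some ((i : Int) + 6))
    let i2 := i + 6
    let post := PySem.List.slice qcols (some (i2 : Int)) (some ((i2 : Int) + 6))
    if pre.length ≠ 6 ∨ post.length ≠ 6 then sets   -- break
    else groupLoopA qcols (sets ++ [(pre, post)]) (i2 + 6)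
  else sets
termination_by qcols.length - i
decreasing_by omega

def group_into_question_sets (qcols : List (String × String × String)) : List ((List (String × String × String)) × (List (String × String × String))) :=
  groupLoopA qcols [] 0

-- ===== PORT B =====
-- the body of Source B's for-loop: append q to the buffer, flush when it holds a dozen
def groupStepB
    (st : (List ((List (String × String × String)) × (List (String × String × String)))) × List (String × String × String))
    (q : String × String × String) :
    (List ((List (String × String × String)) × (List (String × String × String)))) × List (String × String × String) :=
  let buf := st.2 ++ [q]
  if buf.length = 2 * 6 then
    (st.1 ++ [(PySem.List.slice buf none (some (6 : Int)), PySem.List.slice buf (some (6 : Int)) none)], [])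
  else (st.1, buf)

def group_into_question_sets_alt (qcols : List (String × String × String)) : List ((List (String × String × String)) × (List (String × String × String))) :=
  (qcols.foldl groupStepB ([], [])).1

-- ===== PRECONDITION & SPEC =====
def Spec_group_into_question_sets (qcols : List (String × String × String)) (out : List ((List (String × String × String)) × (List (String × String × String)))) : Prop := out = group_into_question_sets_alt qcols
instance (qcols : List (String × String × String)) (out : List ((List (String × String × String)) × (List (String × String × String)))) : Decidable (Spec_group_into_question_sets qcols out) := by unfold Spec_group_into_question_sets; infer_instance

-- ===== CLAIM (what is proved, stated in full; the proofs are below) =====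
def Claim_equal_group_into_question_sets : Prop := ∀ (qcols : List (String × String × String)), Dom_group_into_question_sets qcols → Spec_group_into_question_sets qcols (group_into_question_sets qcols)

-- ===== LEMMAS AND PROOFS =====

-- canonical form both ports are reduced to: consume complete dozens from the front
-- (proof helper)
def chunksC (l : List (String × String × String)) :
    List ((List (String × String × String)) × (List (String × String × String))) :=
  if _h : 12 ≤ l.length then
    (l.take 6, (l.drop 6).take 6) :: chunksC (l.drop 12)
  else []
termination_by l.length
decreasing_by simp; omega

theorem chunksC_short (l : List (String × String × String)) (h : l.length < 12) :
    chunksC l = [] := by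
  rw [chunksC]; simp [Nat.not_le.mpr h]

theorem chunksC_cons12 (c r : List (String × String × String)) (h : c.length = 12) :
    chunksC (c ++ r) = (c.take 6, (c.drop 6).take 6) :: chunksC r := by
  rw [chunksC]
  have hlen : (c ++ r).length = 12 + r.length := by simp [h]
  rw [dif_pos (by omega)]
  have ht : (c ++ r).take 6 = c.take 6 := List.take_append_of_le_length (by omega)
  have hd : (c ++ r).drop 6 = c.drop 6 ++ r := List.drop_append_of_le_length (by omega)
  have hd6 : (c.drop 6).length = 6 := by simp [h]
  have ht2 : (c.drop 6 ++ r).take 6 = (c.drop 6).take 6 := List.take_append_of_le_length (by omega)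
  have hd12 : (c ++ r).drop 12 = r := by
    rw [List.drop_append_of_le_length (by omega)]
    simp [h]
  rw [ht, hd, ht2, hd12]

-- A's loop appends exactly the dozens of the remaining suffix
theorem groupLoopA_eq (qcols : List (String × String × String))
    (sets : List ((List (String × String × String)) × (List (String × String × String)))) (i : Nat) :
    groupLoopA qcols sets i = sets ++ chunksC (qcols.drop i) := by
  by_cases h : i < qcols.length
  · rw [groupLoopA]
    simp only [h, dif_pos]
    have c1 : ((i:Int) + 6) = ((i + 6 : Nat) : Int) := by push_cast; ring
    have c2 : (((i + 6 : Nat) : Int) + 6) = ((i + 12 : Nat) : Int) := by push_cast; ring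
    rw [c1, PySem.List.slice_natCast, c2, PySem.List.slice_natCast]
    have n1 : i + 6 - i = 6 := by omega
    have n2 : i + 12 - (i + 6) = 6 := by omega
    rw [n1, n2]
    have hlp : ((qcols.drop i).take 6).length = min 6 (qcols.length - i) := by simp
    have hlq : ((qcols.drop (i + 6)).take 6).length = min 6 (qcols.length - (i + 6)) := by simp
    by_cases hc : i + 12 ≤ qcols.length
    · rw [if_neg (by omega)]
      rw [groupLoopA_eq qcols _ (i + 6 + 6)]
      have hsplit : qcols.drop i = (qcols.drop i).take 12 ++ qcols.drop (i + 12) := by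
        rw [← List.drop_drop]; exact (List.take_append_drop 12 (qcols.drop i)).symm
      have h12 : ((qcols.drop i).take 12).length = 12 := by simp; omega
      rw [hsplit, chunksC_cons12 _ _ h12]
      have e1 : ((qcols.drop i).take 12).take 6 = (qcols.drop i).take 6 := by
        rw [List.take_take]; norm_num
      have e2 : (((qcols.drop i).take 12).drop 6).take 6 = (qcols.drop (i + 6)).take 6 := by
        rw [List.drop_take, List.take_take, List.drop_drop]
        norm_num
      have e3 : i + 6 + 6 = i + 12 := by omega
      simp [e1, e2, e3]
    · rw [if_pos (by omega)]
      rw [chunksC_short _ (by simp; omega)]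
      simp
  · rw [groupLoopA]
    rw [chunksC_short _ (by simp; omega)]
    simp [h]
termination_by qcols.length - i
decreasing_by omega

-- B's fold maintains: emitted sets so far ++ dozens of (buffer ++ rest of input)
theorem foldB_inv (rest : List (String × String × String))
    (sets : List ((List (String × String × String)) × (List (String × String × String))))
    (buf : List (String × String × String)) (h : buf.length < 12) :
    (rest.foldl groupStepB (sets, buf)).1 = sets ++ chunksC (buf ++ rest) := by
  induction rest generalizing sets buf with
  | nil => simp [chunksC_short buf h]
  | cons q rest ih =>
    rw [List.foldl_cons]
    by_cases hf : (buf ++ [q]).length = 12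
    · have hstep : groupStepB (sets, buf) q =
        (sets ++ [(PySem.List.slice (buf ++ [q]) none (some (6 : Int)),
                   PySem.List.slice (buf ++ [q]) (some (6 : Int)) none)], []) := by
        simp only [groupStepB]
        rw [if_pos (by simpa using hf)]
      rw [hstep, ih _ _ (by simp)]
      have : buf ++ q :: rest = (buf ++ [q]) ++ rest := by simp
      rw [this, chunksC_cons12 _ _ hf]
      have c6 : (6 : Int) = ((6 : Nat) : Int) := by norm_num
      rw [c6, PySem.List.slice_to_natCast, PySem.List.slice_from_natCast]
      have hd6 : ((buf ++ [q]).drop 6).length = 6 := by simp at hf ⊢; omega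
      have : ((buf ++ [q]).drop 6).take 6 = (buf ++ [q]).drop 6 :=
        List.take_of_length_le (by omega)
      simp [this]
    · have hstep : groupStepB (sets, buf) q = (sets, buf ++ [q]) := by
        simp only [groupStepB]
        rw [if_neg (by simpa using hf)]
      rw [hstep, ih _ _ (by simp at hf ⊢; omega)]
      simp

-- ===== VERDICT (by name: the statement is the Claim_ definition above) =====
theorem group_into_question_sets_spec : Claim_equal_group_into_question_sets := by
  intro qcols _
  show group_into_question_sets qcols = group_into_question_sets_alt qcols
  rw [group_into_question_sets, groupLoopA_eq, group_into_question_sets_alt,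
    foldB_inv _ _ _ (by simp)]
  simp
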